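-- pv_equiv track=rewrite | github.com/BhallaLab/FindSim | simdiff.py | matchParamByName
-- ===== SOURCE A (Python) =====
-- def matchParamByName( path, name ):
--     '''
--     Looks for a match of the specified object name in a full object path.
--     Returns True if there is a match.
--
--     The typical Moose object path is something like
--         /model[0]/kinetics[0]/EGFR[0]/EGFR[0].
--     Suppose we wanted to match EGFR. We want it to look up the final part
--     of the string, ignoring all the earlier portions, and stripping out the
--     [0].
--     Here is a problematic (but common) case. Suppose we wanted the enzyme
--     site on PKC:
--         /model[0]/kinetics[0]/PKC[0]/PKC[0]/enz
--     But there is also an enzyme site on PKA.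
--         /model[0]/kinetics[0]/PKA[0]/PKA[0]/enz
--     To disambiguate, we permit specification by longer strings with the "/"
--     separators, such as "PKC/enz"
--     In the case of HillTau the naming is simpler and all molecules and
--     reactions have a unique name.
--     '''
--     if len( path.split(".") ) > 1: # It has fields
--         pField = path.split(".")[-1]
--         nField = name.split(".")[-1]
--         if pField != nField:
--             return False
--         path = path[:-len(pField)-1]
--         name = name[:-len(pField)-1]
--
--     spPath = path.split( "/" )
--     spName = name.split( "/" )
--     if len( spName ) > len( spPath ):
--         return False
--     for ii, nn in enumerate( reversed(spName ) ):
--         p = spPath[-ii - 1]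
--         pp = p[:-3] if p[-3:] == "[0]" else p
--         if pp != nn:
--             return False
--     return True
-- ===== SOURCE B (Python) =====
-- def matchParamByName(path, name):
--     if len(path.split(".")) > 1:  # It has fields
--         pField = path.split(".")[-1]
--         nField = name.split(".")[-1]
--         if pField != nField:
--             return False
--         path = path[:-len(pField) - 1]
--         name = name[:-len(pField) - 1]
--     return _tailMatch(path, name)
--
--
-- def _strip0(c):
--     return c[:-3] if c.endswith("[0]") else c
--
--
-- def _tailMatch(path, name):
--     # Recursively peel the last '/'-component off both strings with rfind;
--     # no split lists are ever built.
--     ip = path.rfind("/")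
--     im = name.rfind("/")
--     pLast = path if ip < 0 else path[ip + 1:]
--     nLast = name if im < 0 else name[im + 1:]
--     if _strip0(pLast) != nLast:
--         return False
--     if im < 0:
--         return True
--     if ip < 0:
--         return False
--     return _tailMatch(path[:ip], name[:im])
-- ===== Notes on version B (the rewrite author's own statement) =====
-- stated objective: alternative
-- what changed: Replaces A's split-into-component-lists plus a reversed index loop with negative indexing by a recursive tail-peeling on the raw strings: rfind locates the last '/', the final components are compared directly, and the function recurses on the string prefixes, never building the split lists.
import Mathlib
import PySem

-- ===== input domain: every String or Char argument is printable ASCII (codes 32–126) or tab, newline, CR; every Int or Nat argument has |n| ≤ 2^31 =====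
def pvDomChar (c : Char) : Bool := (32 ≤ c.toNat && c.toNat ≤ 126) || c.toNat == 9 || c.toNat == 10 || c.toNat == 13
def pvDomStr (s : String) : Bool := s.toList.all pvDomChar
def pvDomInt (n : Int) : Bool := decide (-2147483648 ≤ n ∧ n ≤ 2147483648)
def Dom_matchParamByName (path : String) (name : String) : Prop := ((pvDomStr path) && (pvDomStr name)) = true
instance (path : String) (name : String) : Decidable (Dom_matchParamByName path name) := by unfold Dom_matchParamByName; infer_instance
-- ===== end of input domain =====

-- B replaces A's split-into-lists plus reversed index loop by a recursive tail-peeling on the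
-- raw strings via rfind, never building the split lists (objective: alternative).

-- ===== PORT A =====
-- pp = p[:-3] if p[-3:] == "[0]" else p
def pvNormA (p : List Char) : List Char :=
  if PySem.Chars.slice p (some (-3)) none = "[0]".toList then PySem.Chars.slice p none (some (-3)) else p

-- for ii, nn in enumerate(reversed(spName)): p = spPath[-ii-1]; if pp != nn: return False
def pvLoopA (spPath : List (List Char)) : List (List Char) → Int → Bool
  | [], _ => true
  | nn :: rest, ii =>
    match PySem.List.pyGet? spPath (-ii - 1) with
    | none => false
    | some p => if pvNormA p ≠ nn then false else pvLoopA spPath rest (ii + 1)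

-- the part of A after the '.'-field block
def pvCoreA (path name : List Char) : Bool :=
  let spPath := PySem.Chars.splitOn path "/".toList
  let spName := PySem.Chars.splitOn name "/".toList
  if spName.length > spPath.length then false
  else pvLoopA spPath spName.reverse 0

def matchParamByName (path : String) (name : String) : Bool :=
  let p := path.toList
  let n := name.toList
  if (PySem.Chars.splitOn p ".".toList).length > 1 then
    let pField := (PySem.List.pyGet? (PySem.Chars.splitOn p ".".toList) (-1)).getD []
    let nField := (PySem.List.pyGet? (PySem.Chars.splitOn n ".".toList) (-1)).getD []
    if pField ≠ nField then false
    else pvCoreA (PySem.Chars.slice p none (some (-(pField.length : Int) - 1)))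
                 (PySem.Chars.slice n none (some (-(pField.length : Int) - 1)))
  else pvCoreA p n

-- ===== PORT B =====
-- c[:-3] if c.endswith("[0]") else c
def pvStrip0 (c : List Char) : List Char :=
  if PySem.Chars.endswith c "[0]".toList then PySem.Chars.slice c none (some (-3)) else c

-- [d].isPrefixOf at a position means the char there is d (used by the port's termination proof)
lemma pvSingle_isPrefixOf (d : Char) (t : List Char) :
    [d].isPrefixOf t = (t.head? == some d) := by
  cases t with
  | nil => simp [List.isPrefixOf]
  | cons c r => simp [List.isPrefixOf, Eq.comm]

-- rfind.go for a one-char needle returns -1 or a valid index (used by the port's termination proof)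
lemma pvRfindGo_cases (s : List Char) (d : Char) (j : Nat) :
    PySem.Chars.rfind.go s [d] j = -1 ∨
    ∃ i : Nat, i ≤ j ∧ PySem.Chars.rfind.go s [d] j = (i : Int) ∧ s[i]? = some d := by
  induction j with
  | zero =>
    rw [PySem.Chars.rfind.go]
    by_cases h : [d].isPrefixOf s
    · right
      refine ⟨0, le_refl 0, by simp [h], ?_⟩
      have hh := pvSingle_isPrefixOf d s
      rw [h] at hh
      have h2 : s.head? = some d := by simpa [beq_iff_eq] using hh.symm
      simpa [← List.head?_drop, List.drop_zero] using h2
    · left; simp [h]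
  | succ j IH =>
    rw [PySem.Chars.rfind.go]
    by_cases h : [d].isPrefixOf (s.drop (j + 1))
    · right
      refine ⟨j + 1, le_refl _, by simp [h], ?_⟩
      have hh := pvSingle_isPrefixOf d (s.drop (j + 1))
      rw [h] at hh
      have h2 : (s.drop (j + 1)).head? = some d := by simpa [beq_iff_eq] using hh.symm
      simpa [List.head?_drop] using h2
    · rcases IH with h1 | ⟨i, hij, heq, hget⟩
      · left; simpa [h] using h1
      · right; exact ⟨i, Nat.le_succ_of_le hij, by simpa [h] using heq, hget⟩

-- a nonnegative rfind of "/" is a strictly in-range index (cited by pvTailMatch's decreasing_by)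
lemma pvRfind_lt (s : List Char) (h : ¬ PySem.Chars.rfind s "/".toList < 0) :
    (PySem.Chars.rfind s "/".toList).toNat < s.length := by
  have hgo : PySem.Chars.rfind s "/".toList = PySem.Chars.rfind.go s ['/'] s.length := rfl
  rcases pvRfindGo_cases s '/' s.length with h1 | ⟨i, _, heq, hget⟩
  · rw [hgo, h1] at h; omega
  · rw [hgo, heq]
    have hi : i < s.length := by
      by_contra hge
      rw [List.getElem?_eq_none (by omega)] at hget
      simp at hget
    simpa using hi

-- ip = path.rfind("/"); im = name.rfind("/"); compare last components, recurse on the prefixes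
def pvTailMatch (p n : List Char) : Bool :=
  let ip := PySem.Chars.rfind p "/".toList
  let im := PySem.Chars.rfind n "/".toList
  let pLast := if ip < 0 then p else PySem.Chars.slice p (some (ip + 1)) none
  let nLast := if im < 0 then n else PySem.Chars.slice n (some (im + 1)) none
  if pvStrip0 pLast ≠ nLast then false
  else if hm : im < 0 then true
  else if ip < 0 then false
  else pvTailMatch (PySem.Chars.slice p none (some ip)) (PySem.Chars.slice n none (some im))
termination_by n.length
decreasing_by
  have h := pvRfind_lt n hm
  rw [PySem.Chars.slice_eq_listSlice, PySem.List.slice_to _ (by omega)]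
  simp only [List.length_take]
  omega

def matchParamByName_alt (path : String) (name : String) : Bool :=
  let p := path.toList
  let n := name.toList
  if (PySem.Chars.splitOn p ".".toList).length > 1 then
    let pField := (PySem.List.pyGet? (PySem.Chars.splitOn p ".".toList) (-1)).getD []
    let nField := (PySem.List.pyGet? (PySem.Chars.splitOn n ".".toList) (-1)).getD []
    if pField ≠ nField then false
    else pvTailMatch (PySem.Chars.slice p none (some (-(pField.length : Int) - 1)))
                     (PySem.Chars.slice n none (some (-(pField.length : Int) - 1)))
  else pvTailMatch p n

-- ===== PRECONDITION & SPEC =====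
def Spec_matchParamByName (path : String) (name : String) (out : Bool) : Prop := out = matchParamByName_alt path name
instance (path : String) (name : String) (out : Bool) : Decidable (Spec_matchParamByName path name out) := by unfold Spec_matchParamByName; infer_instance

-- ===== CLAIM (what is proved, stated in full; the proofs are below) =====
def Claim_equal_matchParamByName : Prop := ∀ (path : String) (name : String), Dom_matchParamByName path name → Spec_matchParamByName path name (matchParamByName path name)

-- ===== LEMMAS AND PROOFS =====

-- the two normalizers agree
lemma pvNorm_eq (c : List Char) : pvNormA c = pvStrip0 c := by
  unfold pvNormA pvStrip0
  have h3 : PySem.Chars.slice c (some (-3)) none = c.drop (c.length - 3) := by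
    rw [PySem.Chars.slice_eq_listSlice, PySem.List.slice_from_neg_ofNat c 3 (by omega)]
  have hiff : (PySem.Chars.slice c (some (-3)) none = "[0]".toList) ↔
      (PySem.Chars.endswith c "[0]".toList = true) := by
    rw [PySem.Chars.endswith_iff, h3]
    constructor
    · intro h; exact h ▸ List.drop_suffix _ _
    · rintro ⟨t, rfl⟩
      have hl : (t ++ "[0]".toList).length - 3 = t.length := by simp
      rw [hl, List.drop_left]
  split_ifs with h1 h2 h2 <;> first | rfl | (exact absurd (hiff.mp h1) h2) | (exact absurd (hiff.mpr h2) h1)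

-- A's negative indexing hits the reversed path list
lemma pvPyGet_neg (P : List (List Char)) (ii : Nat) (h : ii < P.length) :
    PySem.List.pyGet? P (-(ii : Int) - 1) = some (P.reverse[ii]'(by simpa using h)) := by
  have hidx : PySem.List.pyIdx? P.length (-(ii : Int) - 1) = some (P.length - (ii + 1)) := by
    simp only [PySem.List.pyIdx?]
    rw [if_neg (by omega), if_pos (by omega)]
    congr 1
    omega
  simp only [PySem.List.pyGet?, hidx, Option.bind_some]
  rw [show P.length - (ii + 1) = P.length - 1 - ii from by omega,
    ← List.getElem?_reverse (by simpa using h), List.getElem?_eq_getElem (by simpa using h)]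

-- A's early-return loop over reversed(spName) is a prefix comparison with the normalized reversed path
lemma pvLoopA_eq (P : List (List Char)) (L : List (List Char)) (ii : Nat)
    (h : ii + L.length ≤ P.length) :
    pvLoopA P L (ii : Int) = (L == ((P.reverse.drop ii).take L.length).map pvNormA) := by
  induction L generalizing ii with
  | nil => simp [pvLoopA]
  | cons nn rest IH =>
    have hlt : ii < P.length := by simp at h; omega
    have hlt' : ii < P.reverse.length := by simpa using hlt
    rw [show pvLoopA P (nn :: rest) (ii : Int)
        = match PySem.List.pyGet? P (-(ii : Int) - 1) with
          | none => false
          | some p => if pvNormA p ≠ nn then false else pvLoopA P rest ((ii : Int) + 1) from rfl]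
    rw [pvPyGet_neg P ii hlt]
    rw [show (match some (P.reverse[ii]'hlt') with
          | none => false
          | some p => if pvNormA p ≠ nn then false else pvLoopA P rest ((ii : Int) + 1))
        = (if pvNormA (P.reverse[ii]'hlt') ≠ nn then false else pvLoopA P rest ((ii : Int) + 1)) from rfl]
    rw [List.drop_eq_getElem_cons hlt']
    simp only [List.length_cons, List.take_succ_cons, List.map_cons, List.cons_beq_cons]
    have hcast : ((ii : Int) + 1) = ((ii + 1 : Nat) : Int) := by push_cast; ring
    by_cases hne : pvNormA (P.reverse[ii]'hlt') = nn
    · rw [if_neg (by simpa using hne), hcast, IH (ii + 1) (by simp at h ⊢; omega)]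
      have hb : (nn == pvNormA (P.reverse[ii]'hlt')) = true := by
        rw [beq_iff_eq]; exact hne.symm
      rw [hb, Bool.true_and]
    · rw [if_pos (by simpa using hne)]
      have hb : (nn == pvNormA (P.reverse[ii]'hlt')) = false := by
        rw [beq_eq_false_iff_ne]; exact fun e => hne e.symm
      rw [hb, Bool.false_and]

-- modifyHead with the identity does nothing
lemma pvModifyHead_id (L : List (List Char)) : List.modifyHead (fun x => x) L = L := by
  cases L <;> simp

-- PySem's fuel-driven splitOn is Mathlib's List.splitOn (single-char separator)
lemma pvSplitGo_eq (d : Char) (fuel : Nat) (l cur : List Char) (acc : List (List Char))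
    (h : l.length < fuel) :
    PySem.Chars.splitOn.go [d] fuel l cur acc
      = acc.reverse ++ (l.splitOn d).modifyHead (cur.reverse ++ ·) := by
  induction fuel generalizing l cur acc with
  | zero => omega
  | succ f IH =>
    cases l with
    | nil =>
      rw [PySem.Chars.splitOn.go]
      all_goals simp [List.splitOn]
    | cons c rest =>
      rw [PySem.Chars.splitOn.go]
      have hpre : [d].isPrefixOf (c :: rest) = (c == d) := by simp [List.isPrefixOf, Eq.comm]
      rw [hpre]
      by_cases hc : c = d
      · rw [if_pos (by simp [hc])]
        subst hc
        rw [show List.drop [c].length (c :: rest) = rest from by simp]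
        rw [IH rest [] (cur.reverse :: acc) (by simpa using Nat.lt_of_succ_lt_succ h)]
        simp only [List.splitOn]
        rw [List.splitOnP_cons, if_pos (by simp)]
        simp [pvModifyHead_id]
      · rw [if_neg (by simp [hc])]
        rw [IH rest (c :: cur) acc (by simpa using Nat.lt_of_succ_lt_succ h)]
        simp only [List.splitOn]
        rw [List.splitOnP_cons, if_neg (by simp [hc])]
        rw [List.modifyHead_modifyHead]
        congr 2
        funext x
        simp

lemma pvSplitOn_eq (d : Char) (s : List Char) :
    PySem.Chars.splitOn s [d] = s.splitOn d := by
  unfold PySem.Chars.splitOn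
  rw [pvSplitGo_eq d (s.length + 1) s [] [] (by omega)]
  simp [pvModifyHead_id]

-- splitting a string with no separator
lemma pvSplitOn_of_not_mem (d : Char) (s : List Char) (h : d ∉ s) : s.splitOn d = [s] := by
  induction s with
  | nil => simp [List.splitOn]
  | cons c rest IH =>
    rw [List.splitOn, List.splitOnP_cons, if_neg (by simp; rintro rfl; exact h (by simp))]
    rw [show List.splitOnP (· == d) rest = rest.splitOn d from rfl]
    rw [IH (fun hm => h (List.mem_cons_of_mem _ hm))]
    simp

-- splitting at the last separator
lemma pvSplitOn_append_sep (d : Char) (a b : List Char) (hb : d ∉ b) :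
    (a ++ d :: b).splitOn d = a.splitOn d ++ [b] := by
  induction a with
  | nil =>
    simp only [List.nil_append]
    rw [List.splitOn, List.splitOnP_cons, if_pos (by simp)]
    rw [show List.splitOnP (· == d) b = b.splitOn d from rfl, pvSplitOn_of_not_mem d b hb]
    simp [List.splitOn]
  | cons c a IH =>
    by_cases hc : c = d
    · subst hc
      rw [List.cons_append]
      simp only [List.splitOn]
      rw [List.splitOnP_cons, if_pos (by simp)]
      rw [show List.splitOnP (· == c) (a ++ c :: b) = (a ++ c :: b).splitOn c from rfl, IH]
      rw [List.splitOnP_cons, if_pos (by simp)]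
      simp [List.splitOn]
    · rw [List.cons_append]
      simp only [List.splitOn]
      rw [List.splitOnP_cons, if_neg (by simp [hc])]
      rw [show List.splitOnP (· == d) (a ++ d :: b) = (a ++ d :: b).splitOn d from rfl, IH]
      rw [List.splitOnP_cons, if_neg (by simp [hc])]
      rw [show List.splitOnP (· == d) a = a.splitOn d from rfl]
      rcases List.exists_cons_of_ne_nil (List.splitOnP_ne_nil (· == d) a) with ⟨h0, t0, he⟩
      rw [show a.splitOn d = List.splitOnP (· == d) a from rfl, he]
      simp

-- rfind.go: no occurrence up to j gives -1
lemma pvRfindGo_neg (s : List Char) (d : Char) (j : Nat)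
    (h : ∀ i : Nat, i ≤ j → s[i]? ≠ some d) :
    PySem.Chars.rfind.go s [d] j = -1 := by
  induction j with
  | zero =>
    have hcond : [d].isPrefixOf s = (s[0]? == some d) := by
      rw [pvSingle_isPrefixOf, List.head?_eq_getElem?]
    rw [PySem.Chars.rfind.go, hcond]
    have h0 := h 0 (le_refl 0)
    simp [h0]
  | succ j IH =>
    have hcond : [d].isPrefixOf (List.drop (j + 1) s) = (s[j + 1]? == some d) := by
      rw [pvSingle_isPrefixOf, List.head?_drop]
    rw [PySem.Chars.rfind.go, hcond]
    have h1 := h (j + 1) (le_refl _)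
    simp only [beq_eq_false_iff_ne, ne_eq, h1, not_false_eq_true, beq_iff_eq,
      if_neg (show ¬ (s[j + 1]? = some d) from h1)]
    exact IH (fun i hi => h i (Nat.le_succ_of_le hi))

-- rfind.go: the highest occurrence wins
lemma pvRfindGo_pos (s : List Char) (d : Char) (i j : Nat)
    (hget : s[i]? = some d) (hij : i ≤ j)
    (hmax : ∀ k : Nat, i < k → k ≤ j → s[k]? ≠ some d) :
    PySem.Chars.rfind.go s [d] j = (i : Int) := by
  induction j with
  | zero =>
    have h0 : i = 0 := Nat.le_zero.mp hij
    subst h0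
    have hcond : [d].isPrefixOf s = (s[0]? == some d) := by
      rw [pvSingle_isPrefixOf, List.head?_eq_getElem?]
    rw [PySem.Chars.rfind.go, hcond]
    simp [hget]
  | succ j IH =>
    have hcond : [d].isPrefixOf (List.drop (j + 1) s) = (s[j + 1]? == some d) := by
      rw [pvSingle_isPrefixOf, List.head?_drop]
    rw [PySem.Chars.rfind.go, hcond]
    by_cases he : i = j + 1
    · subst he
      simp [hget]
    · have hij' : i ≤ j := by omega
      have hne := hmax (j + 1) (by omega) (le_refl _)
      rw [if_neg (by simpa using hne)]
      exact IH hij' (fun k hk1 hk2 => hmax k hk1 (Nat.le_succ_of_le hk2))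

-- rfind of "/" on a string without '/'
lemma pvRfind_of_not_mem (s : List Char) (h : '/' ∉ s) :
    PySem.Chars.rfind s "/".toList = -1 := by
  have hgo : PySem.Chars.rfind s "/".toList = PySem.Chars.rfind.go s ['/'] s.length := rfl
  rw [hgo]
  exact pvRfindGo_neg s '/' s.length (fun i _ hi => h (List.mem_of_getElem? hi))

-- rfind of "/" at the last separator
lemma pvRfind_append (a b : List Char) (hb : '/' ∉ b) :
    PySem.Chars.rfind (a ++ '/' :: b) "/".toList = (a.length : Int) := by
  have hgo : PySem.Chars.rfind (a ++ '/' :: b) "/".toList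
      = PySem.Chars.rfind.go (a ++ '/' :: b) ['/'] (a ++ '/' :: b).length := rfl
  rw [hgo]
  apply pvRfindGo_pos
  · rw [List.getElem?_append_right (le_refl _)]
    simp
  · simp
  · intro k hk1 _ hk
    have h1 : a.length + 1 ≤ k := hk1
    rw [List.getElem?_append_right (by omega)] at hk
    have h2 : k - a.length = (k - a.length - 1) + 1 := by omega
    rw [h2, List.getElem?_cons_succ] at hk
    exact hb (List.mem_of_getElem? hk)

-- every string with a '/' splits as (before last sep) ++ '/' :: (clean tail)
lemma pvExists_last_sep (s : List Char) (h : '/' ∈ s) :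
    ∃ a b, s = a ++ '/' :: b ∧ '/' ∉ b := by
  induction s using List.reverseRecOn with
  | nil => simp at h
  | append_singleton xs c IH =>
    by_cases hc : c = '/'
    · exact ⟨xs, [], by simp [hc], by simp⟩
    · have hx : '/' ∈ xs := by
        rcases List.mem_append.mp h with h1 | h1
        · exact h1
        · simp at h1; exact absurd h1.symm hc
      rcases IH hx with ⟨a, b, he, hbx⟩
      refine ⟨a, b ++ [c], by simp [he], ?_⟩
      simp only [List.mem_append, List.mem_singleton, not_or]
      exact ⟨hbx, fun e => hc e.symm⟩

-- the slice before / after the last separator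
lemma pvSliceAfter (a b : List Char) :
    PySem.Chars.slice (a ++ '/' :: b) (some ((a.length : Int) + 1)) none = b := by
  rw [PySem.Chars.slice_eq_listSlice,
    show ((a.length : Int) + 1) = ((a.length + 1 : Nat) : Int) from by push_cast; ring,
    PySem.List.slice_from_natCast]
  rw [show a.length + 1 = (a ++ ['/']).length from by simp,
    show a ++ '/' :: b = (a ++ ['/']) ++ b from by simp]
  exact List.drop_left

lemma pvSliceBefore (a b : List Char) :
    PySem.Chars.slice (a ++ '/' :: b) none (some (a.length : Int)) = a := by
  rw [PySem.Chars.slice_eq_listSlice, PySem.List.slice_to_natCast]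
  exact List.take_left

-- numeric if-conditions that appear after rewriting rfind's value
lemma pvIntNegOne : (((-1 : Int)) < 0) = True := eq_true (by omega)
lemma pvCastNotLt (k : Nat) : (((k : Int)) < 0) = False := eq_false (by omega)

-- a reversed split is never the empty list
lemma pvSplitRev_ne (d : Char) (s : List Char) : ((s.splitOn d).reverse.isEmpty) = false := by
  have hne := List.splitOnP_ne_nil (· == d) s
  simp only [List.isEmpty_eq_false_iff, ne_eq, List.reverse_eq_nil_iff]
  exact hne

-- the component-level view of B's recursion
def pvRMatch : List (List Char) → List (List Char) → Bool
  | pl :: pRest, nl :: nRest =>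
    if pvStrip0 pl ≠ nl then false
    else if nRest.isEmpty then true
    else if pRest.isEmpty then false
    else pvRMatch pRest nRest
  | _, _ => false

-- pvRMatch (on reversed component lists) is A's length-check + prefix comparison
lemma pvRMatch_eq (RN RP : List (List Char)) (hRP : RP ≠ []) (hRN : RN ≠ []) :
    pvRMatch RP RN = (decide (RN.length ≤ RP.length) && (RN == (RP.take RN.length).map pvNormA)) := by
  induction RN generalizing RP with
  | nil => exact absurd rfl hRN
  | cons nl nRest IH =>
    cases RP with
    | nil => exact absurd rfl hRP
    | cons pl pRest =>
      rw [show pvRMatch (pl :: pRest) (nl :: nRest)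
          = (if pvStrip0 pl ≠ nl then false
             else if nRest.isEmpty then true
             else if pRest.isEmpty then false
             else pvRMatch pRest nRest) from rfl]
      by_cases hne : pvStrip0 pl = nl
      · rw [if_neg (by simpa using hne)]
        cases nRest with
        | nil =>
          simp [pvNorm_eq, hne]
        | cons n2 nRest2 =>
          rw [if_neg (by simp)]
          cases pRest with
          | nil =>
            simp
          | cons p2 pRest2 =>
            rw [if_neg (by simp), IH (p2 :: pRest2) (by simp) (by simp)]
            simp only [List.length_cons, List.take_succ_cons, List.map_cons, List.cons_beq_cons]
            rw [show (nl == pvNormA pl) = true from by rw [beq_iff_eq, pvNorm_eq]; exact hne.symm]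
            simp only [Bool.true_and]
            congr 1
            simp only [decide_eq_decide]
            omega
      · rw [if_pos (by simpa using hne)]
        have hb : (nl == pvNormA pl) = false := by
          rw [beq_eq_false_iff_ne, pvNorm_eq]; exact fun e => hne e.symm
        simp [hb]

-- B's recursion when name has no separator: one comparison, no recursive call
lemma pvTail_nosep (p n : List Char) (hm : '/' ∉ n) :
    pvTailMatch p n = pvRMatch (p.splitOn '/').reverse (n.splitOn '/').reverse := by
  have him := pvRfind_of_not_mem n hm
  rw [pvSplitOn_of_not_mem '/' n hm]
  by_cases hp : '/' ∈ p
  · rcases pvExists_last_sep p hp with ⟨a, b, rfl, hb⟩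
    have hip := pvRfind_append a b hb
    rw [pvTailMatch]
    simp only [him, hip, pvIntNegOne, pvCastNotLt, if_true, if_false, dite_true, dite_false,
      pvSliceAfter]
    rw [pvSplitOn_append_sep _ _ _ hb]
    simp only [List.reverse_append, List.reverse_cons, List.reverse_nil, List.nil_append,
      List.singleton_append, List.reverse_singleton]
    rw [show pvRMatch (b :: (a.splitOn '/').reverse) [n]
        = (if pvStrip0 b ≠ n then false
           else if ([] : List (List Char)).isEmpty then true
           else if ((a.splitOn '/').reverse).isEmpty then false
           else pvRMatch (a.splitOn '/').reverse []) from rfl]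
    rw [if_pos (show (([] : List (List Char)).isEmpty = true) from by simp)]
  · have hip := pvRfind_of_not_mem p hp
    rw [pvTailMatch]
    simp only [him, hip, pvIntNegOne, pvCastNotLt, if_true, if_false, dite_true, dite_false]
    rw [pvSplitOn_of_not_mem '/' p hp]
    simp only [List.reverse_singleton]
    rw [show pvRMatch [p] [n]
        = (if pvStrip0 p ≠ n then false
           else if ([] : List (List Char)).isEmpty then true
           else if ([] : List (List Char)).isEmpty then false
           else pvRMatch [] []) from rfl]
    rw [if_pos (show (([] : List (List Char)).isEmpty = true) from by simp)]

-- B's string recursion computes pvRMatch of the reversed splits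
lemma pvTailMatch_eq_aux (k : Nat) : ∀ p n : List Char, n.length ≤ k →
    pvTailMatch p n = pvRMatch (p.splitOn '/').reverse (n.splitOn '/').reverse := by
  induction k with
  | zero =>
    intro p n hn
    have hnil : n = [] := List.eq_nil_of_length_eq_zero (Nat.le_zero.mp hn)
    subst hnil
    exact pvTail_nosep p [] (by simp)
  | succ k IH =>
    intro p n hn
    by_cases hm : '/' ∈ n
    · rcases pvExists_last_sep n hm with ⟨aN, bN, rfl, hbN⟩
      have him := pvRfind_append aN bN hbN
      by_cases hp : '/' ∈ p
      · rcases pvExists_last_sep p hp with ⟨a, b, rfl, hb⟩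
        have hip := pvRfind_append a b hb
        rw [pvTailMatch]
        simp only [him, hip, pvIntNegOne, pvCastNotLt, if_true, if_false, dite_true, dite_false,
          pvSliceAfter, pvSliceBefore]
        rw [pvSplitOn_append_sep _ _ _ hb, pvSplitOn_append_sep _ _ _ hbN]
        simp only [List.reverse_append, List.reverse_cons, List.reverse_nil, List.nil_append,
          List.singleton_append]
        rw [show pvRMatch (b :: (a.splitOn '/').reverse) (bN :: (aN.splitOn '/').reverse)
            = (if pvStrip0 b ≠ bN then false
               else if ((aN.splitOn '/').reverse).isEmpty then true
               else if ((a.splitOn '/').reverse).isEmpty then false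
               else pvRMatch (a.splitOn '/').reverse (aN.splitOn '/').reverse) from rfl]
        by_cases hne : pvStrip0 b = bN
        · rw [if_neg (by simpa using hne), if_neg (by simpa using hne)]
          rw [show ((aN.splitOn '/').reverse).isEmpty = false from pvSplitRev_ne '/' aN,
            show ((a.splitOn '/').reverse).isEmpty = false from pvSplitRev_ne '/' a]
          simp only [Bool.false_eq_true, if_false]
          exact IH a aN (by simp at hn; omega)
        · rw [if_pos (by simpa using hne), if_pos (by simpa using hne)]
      · have hip := pvRfind_of_not_mem p hp
        rw [pvTailMatch]
        simp only [him, hip, pvIntNegOne, pvCastNotLt, if_true, if_false, dite_true, dite_false,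
          pvSliceAfter]
        rw [pvSplitOn_of_not_mem '/' p hp, pvSplitOn_append_sep _ _ _ hbN]
        simp only [List.reverse_append, List.reverse_cons, List.reverse_nil, List.nil_append,
          List.singleton_append, List.reverse_singleton]
        rw [show pvRMatch [p] (bN :: (aN.splitOn '/').reverse)
            = (if pvStrip0 p ≠ bN then false
               else if ((aN.splitOn '/').reverse).isEmpty then true
               else if ([] : List (List Char)).isEmpty then false
               else pvRMatch [] (aN.splitOn '/').reverse) from rfl]
        by_cases hne : pvStrip0 p = bN
        · rw [if_neg (by simpa using hne), if_neg (by simpa using hne)]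
          rw [show ((aN.splitOn '/').reverse).isEmpty = false from pvSplitRev_ne '/' aN]
          simp only [Bool.false_eq_true, if_false]
          rw [if_pos (show (([] : List (List Char)).isEmpty = true) from by simp)]
        · rw [if_pos (by simpa using hne), if_pos (by simpa using hne)]
    · exact pvTail_nosep p n hm

-- the post-field-block computations agree
lemma pvCore_eq (p n : List Char) : pvCoreA p n = pvTailMatch p n := by
  unfold pvCoreA
  dsimp only
  rw [show "/".toList = ['/'] from rfl, pvSplitOn_eq, pvSplitOn_eq]
  rw [pvTailMatch_eq_aux n.length p n (le_refl _)]
  set P := p.splitOn '/' with hP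
  set N := n.splitOn '/' with hN
  have hPne : P ≠ [] := List.splitOnP_ne_nil _ _
  have hNne : N ≠ [] := List.splitOnP_ne_nil _ _
  rw [pvRMatch_eq N.reverse P.reverse (by simpa using hPne) (by simpa using hNne)]
  by_cases hlen : N.length > P.length
  · rw [if_pos hlen]
    rw [show (decide (N.reverse.length ≤ P.reverse.length) : Bool) = false from by
      simp only [List.length_reverse]; simp; omega]
    rw [Bool.false_and]
  · rw [if_neg hlen]
    rw [Nat.not_lt] at hlen
    rw [show ((0 : Int) = ((0 : Nat) : Int)) from rfl]
    rw [pvLoopA_eq P N.reverse 0 (by simpa using hlen)]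
    rw [show (decide (N.reverse.length ≤ P.reverse.length) : Bool) = true from by
      simp only [List.length_reverse]; simpa using hlen]
    rw [Bool.true_and]
    simp

-- ===== VERDICT (by name: the statement is the Claim_ definition above) =====
set_option maxHeartbeats 1000000 in
theorem matchParamByName_spec : Claim_equal_matchParamByName := by
  intro path name _
  unfold Spec_matchParamByName matchParamByName matchParamByName_alt
  dsimp only
  split_ifs <;> first
  | (exact pvCore_eq _ _)
  | rfl
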